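-- pv_equiv track=rewrite | github.com/naeim179/qrshilde | qrshilde/analysis/analyzer.py | _domain_in_set
-- ===== SOURCE A (Python) =====
-- def _domain_in_set(domain: str | None, values: set[str]) -> bool:
--     d = (domain or "").lower().strip(".")
--     if not d:
--         return False
--
--     for base in values:
--         b = (base or "").lower().strip(".")
--         if d == b or d.endswith("." + b):
--             return True
--     return False
-- ===== SOURCE B (Python) =====
-- def _domain_in_set(domain, values):
--     d = (domain or "").lower().strip(".")
--     if not d:
--         return False
--     norm = {(v or "").lower().strip(".") for v in values}
--     parts = d.split(".")
--     return any(".".join(parts[i:]) in norm for i in range(len(parts)))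
-- ===== Notes on version B (the rewrite author's own statement) =====
-- stated objective: alternative
-- what changed: Instead of scanning every value and testing equality/dot-suffix against the domain, B normalizes the values into a set once and probes it with the domain's own dot-suffix candidates ('.'.join(parts[i:])), replacing the per-value string comparisons with per-label set lookups.
import Mathlib
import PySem

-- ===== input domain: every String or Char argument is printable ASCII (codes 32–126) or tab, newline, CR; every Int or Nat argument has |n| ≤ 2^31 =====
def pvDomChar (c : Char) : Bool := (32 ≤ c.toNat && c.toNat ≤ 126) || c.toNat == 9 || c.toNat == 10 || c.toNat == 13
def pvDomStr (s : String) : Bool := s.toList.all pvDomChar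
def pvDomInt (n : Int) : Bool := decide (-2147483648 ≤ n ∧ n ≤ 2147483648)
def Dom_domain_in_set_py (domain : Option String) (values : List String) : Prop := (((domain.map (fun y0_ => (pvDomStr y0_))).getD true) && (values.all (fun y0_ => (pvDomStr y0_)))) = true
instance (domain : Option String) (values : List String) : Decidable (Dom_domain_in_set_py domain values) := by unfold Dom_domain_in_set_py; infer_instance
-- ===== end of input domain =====

-- ===== PORT A =====
-- B builds a set of normalized values once and probes it with the domain's dot-suffix
-- candidates instead of scanning every value (objective: alternative algorithm, same cost).

-- A's 'for base in values: … return True / return False' loop (order-independent: a bool any).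
def pvALoop (d : String) : List String → Bool
  | [] => false
  | base :: rest =>
      -- b = (base or "").lower().strip(".")   ('base or ""' is the identity on str)
      let b := PySem.Str.stripChars (PySem.Str.lower base) "."
      if d == b || PySem.Str.endswith d ("." ++ b) then true else pvALoop d rest

def domain_in_set_py (domain : Option String) (values : List String) : Bool :=
  let d := PySem.Str.stripChars (PySem.Str.lower (domain.getD "")) "."
  if d == "" then false
  else pvALoop d values

-- ===== PORT B =====
def domain_in_set_py_alt (domain : Option String) (values : List String) : Bool :=
  let d := PySem.Str.stripChars (PySem.Str.lower (domain.getD "")) "."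
  if d == "" then false
  else
    let norm : PySem.Set String :=
      PySem.Set.ofList (values.map fun v => PySem.Str.stripChars (PySem.Str.lower v) ".")
    -- parts = d.split(".")  (nonempty literal separator; ported via PySem.Chars.splitOn)
    let parts := PySem.Chars.splitOn d.toList ['.']
    ((List.range parts.length).any fun i =>
      PySem.Set.contains norm (String.ofList (PySem.Chars.join ['.'] (parts.drop i))))

-- ===== PRECONDITION & SPEC =====
def Spec_domain_in_set_py (domain : Option String) (values : List String) (out : Bool) : Prop := out = domain_in_set_py_alt domain values
instance (domain : Option String) (values : List String) (out : Bool) : Decidable (Spec_domain_in_set_py domain values out) := by unfold Spec_domain_in_set_py; infer_instance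

-- ===== CLAIM (what is proved, stated in full; the proofs are below) =====
def Claim_equal_domain_in_set_py : Prop := ∀ (domain : Option String) (values : List String), Dom_domain_in_set_py domain values → Spec_domain_in_set_py domain values (domain_in_set_py domain values)



-- ===== LEMMAS AND PROOFS =====

-- Reference single-character split, convenient for induction.
def pvSplitCh (ch : Char) : List Char → List (List Char)
  | [] => [[]]
  | c :: rest => if c = ch then [] :: pvSplitCh ch rest
                 else (pvSplitCh ch rest).modifyHead (c :: ·)

theorem pvSplitCh_ne_nil (ch : Char) (l : List Char) : pvSplitCh ch l ≠ [] := by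
  induction l with
  | nil => simp [pvSplitCh]
  | cons c rest ih =>
    simp only [pvSplitCh]
    split
    · simp
    · cases h : pvSplitCh ch rest with
      | nil => exact absurd h ih
      | cons p ps => simp

theorem pvSplitOn_go_eq (ch : Char) (l : List Char) :
    ∀ (fuel : Nat) (cur : List Char) (acc : List (List Char)), l.length < fuel →
      PySem.Chars.splitOn.go [ch] fuel l cur acc
        = acc.reverse ++ (pvSplitCh ch l).modifyHead (cur.reverse ++ ·) := by
  induction l with
  | nil =>
    intro fuel cur acc h
    cases fuel with
    | zero => omega
    | succ f => simp [PySem.Chars.splitOn.go, pvSplitCh]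
  | cons c rest ih =>
    intro fuel cur acc h
    cases fuel with
    | zero => omega
    | succ f =>
      by_cases hc : c = ch
      · subst hc
        have hpre : [c].isPrefixOf (c :: rest) = true := by simp [List.isPrefixOf]
        rw [show PySem.Chars.splitOn.go [c] (f+1) (c :: rest) cur acc
              = PySem.Chars.splitOn.go [c] f rest [] (cur.reverse :: acc) from by
            simp [PySem.Chars.splitOn.go, hpre]]
        rw [ih f [] (cur.reverse :: acc) (by simp at h ⊢; omega)]
        cases hs : pvSplitCh c rest with
        | nil => exact absurd hs (pvSplitCh_ne_nil c rest)
        | cons p ps => simp [pvSplitCh, hs]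
      · have hpre : [ch].isPrefixOf (c :: rest) = false := by
          simp [List.isPrefixOf]; exact fun hh => absurd hh.symm hc
        rw [show PySem.Chars.splitOn.go [ch] (f+1) (c :: rest) cur acc
              = PySem.Chars.splitOn.go [ch] f rest (c :: cur) acc from by
            simp [PySem.Chars.splitOn.go, hpre]]
        rw [ih f (c :: cur) acc (by simp at h ⊢; omega)]
        cases hs : pvSplitCh ch rest with
        | nil => exact absurd hs (pvSplitCh_ne_nil ch rest)
        | cons p ps => simp [pvSplitCh, hc, hs]

theorem pvSplitOn_eq (ch : Char) (cs : List Char) :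
    PySem.Chars.splitOn cs [ch] = pvSplitCh ch cs := by
  rw [show PySem.Chars.splitOn cs [ch] = PySem.Chars.splitOn.go [ch] (cs.length + 1) cs [] [] from rfl]
  rw [pvSplitOn_go_eq ch cs (cs.length + 1) [] [] (by omega)]
  cases hs : pvSplitCh ch cs with
  | nil => exact absurd hs (pvSplitCh_ne_nil ch cs)
  | cons p ps => simp

theorem pvJoin_splitCh (ch : Char) (cs : List Char) :
    PySem.Chars.join [ch] (pvSplitCh ch cs) = cs := by
  induction cs with
  | nil => simp [pvSplitCh, PySem.Chars.join_singleton]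
  | cons c rest ih =>
    by_cases hc : c = ch
    · subst hc
      cases hs : pvSplitCh c rest with
      | nil => exact absurd hs (pvSplitCh_ne_nil c rest)
      | cons p ps =>
        rw [show pvSplitCh c (c :: rest) = [] :: p :: ps by simp [pvSplitCh, hs]]
        rw [PySem.Chars.join_cons_cons]
        rw [hs] at ih
        simp [ih]
    · cases hs : pvSplitCh ch rest with
      | nil => exact absurd hs (pvSplitCh_ne_nil ch rest)
      | cons p ps =>
        rw [show pvSplitCh ch (c :: rest) = (c :: p) :: ps by simp [pvSplitCh, hc, hs]]
        rw [hs] at ih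
        cases ps with
        | nil => simpa [PySem.Chars.join_singleton] using congrArg (c :: ·) ih
        | cons q qs =>
          rw [PySem.Chars.join_cons_cons] at ih ⊢
          simpa using congrArg (c :: ·) ih

theorem pvSplitCh_not_mem (ch : Char) (cs : List Char) :
    ∀ p ∈ pvSplitCh ch cs, ch ∉ p := by
  induction cs with
  | nil => simp [pvSplitCh]
  | cons c rest ih =>
    by_cases hc : c = ch
    · subst hc
      simp only [pvSplitCh]
      intro p hp
      rcases List.mem_cons.mp hp with hp | hp
      · simp [hp]
      · exact ih p hp
    · cases hs : pvSplitCh ch rest with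
      | nil => exact absurd hs (pvSplitCh_ne_nil ch rest)
      | cons q qs =>
        rw [show pvSplitCh ch (c :: rest) = (c :: q) :: qs by simp [pvSplitCh, hc, hs]]
        rw [hs] at ih
        intro p hp
        rcases List.mem_cons.mp hp with hp | hp
        · subst hp
          have hq := ih q (by simp)
          intro hmem
          rcases List.mem_cons.mp hmem with hmem | hmem
          · exact hc hmem.symm
          · exact hq hmem
        · exact ih p (by simp [hp])

-- A suffix starting with ch of 'p ++ ch :: rest' with ch ∉ p is a suffix of 'ch :: rest'.
theorem pvSuffix_through (ch : Char) (p rest b : List Char) (hp : ch ∉ p) :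
    (ch :: b) <:+ p ++ ch :: rest ↔ (ch :: b) <:+ ch :: rest := by
  constructor
  · rintro ⟨t, ht⟩
    rcases List.append_eq_append_iff.mp ht with ⟨a', ha1, ha2⟩ | ⟨c', hc1, hc2⟩
    · cases a' with
      | nil =>
        have hb : ch :: b = ch :: rest := by simpa using ha2
        exact ⟨[], by simp [hb]⟩
      | cons x xs =>
        exfalso
        have hx : ch = x := by simpa using congrArg (fun l => l.head?) ha2
        apply hp
        rw [ha1, hx]
        simp
    · exact ⟨c', hc2.symm⟩
  · rintro ⟨t, ht⟩
    exact ⟨p ++ t, by simp [← ht]⟩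

-- Characterization: suffixes of the join that start right after a separator.
theorem pvJoin_suffix_iff (ch : Char) (ps : List (List Char)) (hps : ∀ p ∈ ps, ch ∉ p) (b : List Char) :
    (ch :: b) <:+ PySem.Chars.join [ch] ps
      ↔ ∃ i, 1 ≤ i ∧ i < ps.length ∧ b = PySem.Chars.join [ch] (ps.drop i) := by
  induction ps with
  | nil => simp [PySem.Chars.join_nil]
  | cons p ps ih =>
    cases ps with
    | nil =>
      rw [PySem.Chars.join_singleton]
      constructor
      · intro hsuf
        exfalso
        exact hps p (by simp) (hsuf.subset (by simp))
      · rintro ⟨i, h1, h2, _⟩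
        simp at h2; omega
    | cons q qs =>
      rw [PySem.Chars.join_cons_cons]
      rw [show p ++ [ch] ++ PySem.Chars.join [ch] (q :: qs)
            = p ++ ch :: PySem.Chars.join [ch] (q :: qs) by simp]
      rw [pvSuffix_through ch p _ b (hps p (by simp))]
      rw [List.suffix_cons_iff]
      have ih' := ih (fun r hr => hps r (by simp [hr]))
      constructor
      · rintro (h | h)
        · exact ⟨1, by simp, by simp, by simpa using congrArg List.tail h⟩
        · rcases ih'.mp h with ⟨i, h1, h2, h3⟩
          exact ⟨i + 1, by omega, by simp at h2 ⊢; omega, by simpa using h3⟩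
      · rintro ⟨i, h1, h2, h3⟩
        cases i with
        | zero => omega
        | succ j =>
          cases j with
          | zero => exact Or.inl (by simp [List.drop] at h3; simp [h3])
          | succ k =>
            right
            apply ih'.mpr
            exact ⟨k + 1, by omega, by simp at h2 ⊢; omega, by simpa using h3⟩

-- Full candidate characterization for one normalized value b against d.
theorem pvCandidate_iff (cs : List Char) (b : List Char) :
    (cs = b ∨ ('.' :: b) <:+ cs)
      ↔ ∃ i < (pvSplitCh '.' cs).length, b = PySem.Chars.join ['.'] ((pvSplitCh '.' cs).drop i) := by
  have hne := pvSplitCh_ne_nil '.' cs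
  have hj := pvJoin_splitCh '.' cs
  have hmem := pvSplitCh_not_mem '.' cs
  constructor
  · rintro (h | h)
    · refine ⟨0, ?_, by simp only [List.drop_zero]; rw [hj]; exact h.symm⟩
      cases hps : pvSplitCh '.' cs with
      | nil => exact absurd hps hne
      | cons r rs => simp
    · rw [← hj] at h
      rcases (pvJoin_suffix_iff '.' _ hmem b).mp h with ⟨i, _, h2, h3⟩
      exact ⟨i, h2, h3⟩
  · rintro ⟨i, hi, hb⟩
    cases i with
    | zero => exact Or.inl (by simp [hb, hj])
    | succ j =>
      right
      rw [← hj]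
      exact (pvJoin_suffix_iff '.' _ hmem b).mpr ⟨j + 1, by omega, hi, hb⟩

-- A's loop is an existential over values.
theorem pvALoop_iff (d : String) (values : List String) :
    pvALoop d values = true
      ↔ ∃ v ∈ values,
          (d == PySem.Str.stripChars (PySem.Str.lower v) "."
            || PySem.Str.endswith d ("." ++ PySem.Str.stripChars (PySem.Str.lower v) ".")) = true := by
  induction values with
  | nil => simp [pvALoop]
  | cons v vs ih =>
    simp only [pvALoop]
    split
    · rename_i hcond
      simp only [true_iff]
      exact ⟨v, by simp, hcond⟩
    · rename_i hcond
      rw [ih]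
      constructor
      · rintro ⟨w, hw, hc⟩
        exact ⟨w, by simp [hw], hc⟩
      · rintro ⟨w, hw, hc⟩
        rcases List.mem_cons.mp hw with rfl | hw
        · exact absurd hc hcond
        · exact ⟨w, hw, hc⟩

-- Per value: A's test equals "some candidate suffix equals the normalized value".
theorem pvPerValue (d b : String) :
    (d == b || PySem.Str.endswith d ("." ++ b)) = true
      ↔ ∃ i < (pvSplitCh '.' d.toList).length,
          b = String.ofList (PySem.Chars.join ['.'] ((pvSplitCh '.' d.toList).drop i)) := by
  have h := pvCandidate_iff d.toList b.toList
  constructor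
  · intro hc
    have hc' : d.toList = b.toList ∨ ('.' :: b.toList) <:+ d.toList := by
      rw [Bool.or_eq_true] at hc
      rcases hc with h1 | h1
      · exact Or.inl (congrArg String.toList (by simpa using h1))
      · right
        have := (PySem.Chars.endswith_iff d.toList ("." ++ b).toList).mp (by
          simpa [PySem.Str.endswith_eq] using h1)
        simpa using this
    rcases h.mp hc' with ⟨i, hi, hcand⟩
    refine ⟨i, hi, ?_⟩
    apply String.toList_injective
    simp [hcand]
  · rintro ⟨i, hi, hb⟩
    have hb' : b.toList = PySem.Chars.join ['.'] ((pvSplitCh '.' d.toList).drop i) := by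
      rw [hb]; simp
    rcases h.mpr ⟨i, hi, hb'⟩ with hcase | hcase
    · rw [Bool.or_eq_true]
      exact Or.inl (by simp [beq_iff_eq]; exact String.toList_injective hcase)
    · rw [Bool.or_eq_true]
      right
      rw [PySem.Str.endswith_eq]
      apply (PySem.Chars.endswith_iff _ _).mpr
      simpa using hcase

set_option maxHeartbeats 2000000 in
-- A's scan equals B's candidate probing (the generic form of the verdict).
theorem pvMain (d : String) (values : List String) :
    pvALoop d values
      = ((List.range (PySem.Chars.splitOn d.toList ['.']).length).any fun i =>
          PySem.Set.contains
            (PySem.Set.ofList (values.map fun v => PySem.Str.stripChars (PySem.Str.lower v) "."))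
            (String.ofList (PySem.Chars.join ['.'] ((PySem.Chars.splitOn d.toList ['.']).drop i)))) := by
  rw [pvSplitOn_eq '.' d.toList]
  apply Bool.coe_iff_coe.mp
  rw [pvALoop_iff, List.any_eq_true]
  constructor
  · rintro ⟨v, hv, hc⟩
    rcases (pvPerValue d _).mp hc with ⟨i, hi, hcand⟩
    refine ⟨i, List.mem_range.mpr hi, ?_⟩
    rw [PySem.Set.contains_iff, PySem.Set.mem_ofList]
    exact List.mem_map.mpr ⟨v, hv, hcand⟩
  · rintro ⟨i, hi, hc⟩
    rw [PySem.Set.contains_iff, PySem.Set.mem_ofList] at hc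
    rcases List.mem_map.mp hc with ⟨v, hv, hveq⟩
    exact ⟨v, hv, (pvPerValue d _).mpr ⟨i, List.mem_range.mp hi, hveq⟩⟩

-- ===== VERDICT (by name: the statement is the Claim_ definition above) =====
theorem domain_in_set_py_spec : Claim_equal_domain_in_set_py := by
  intro domain values _
  unfold Spec_domain_in_set_py domain_in_set_py domain_in_set_py_alt
  by_cases h0 : (PySem.Str.stripChars (PySem.Str.lower (domain.getD "")) "." == "") = true
  · simp only [h0, if_true]
  · simp only [h0, Bool.false_eq_true, if_false]
    exact pvMain _ values
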